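-- pv_equiv track=rewrite | github.com/AlanWakeKing/Car-transport-pass-system | backend/propusk/org_report.py | _find_table_body
-- ===== SOURCE A (Python) =====
-- def _find_table_body(elements):
--     for el in elements:
--         if el.get("id") == "r_table_body":
--             return el
--     for el in elements:
--         if el.get("type") == "table_body":
--             return el
--     return None
-- ===== SOURCE B (Python) =====
-- def _find_table_body(elements):
--     id_match = None
--     type_match = None
--     for el in elements:
--         if id_match is None and el.get("id") == "r_table_body":
--             id_match = el
--         if type_match is None and el.get("type") == "table_body":
--             type_match = el
--     return id_match if id_match is not None else type_match
-- ===== Notes on version B (the rewrite author's own statement) =====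
-- stated objective: alternative
-- what changed: Single pass maintaining first id-match and first type-match accumulators with the priority resolved after the loop, instead of two separate scans with early returns.
import Mathlib
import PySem

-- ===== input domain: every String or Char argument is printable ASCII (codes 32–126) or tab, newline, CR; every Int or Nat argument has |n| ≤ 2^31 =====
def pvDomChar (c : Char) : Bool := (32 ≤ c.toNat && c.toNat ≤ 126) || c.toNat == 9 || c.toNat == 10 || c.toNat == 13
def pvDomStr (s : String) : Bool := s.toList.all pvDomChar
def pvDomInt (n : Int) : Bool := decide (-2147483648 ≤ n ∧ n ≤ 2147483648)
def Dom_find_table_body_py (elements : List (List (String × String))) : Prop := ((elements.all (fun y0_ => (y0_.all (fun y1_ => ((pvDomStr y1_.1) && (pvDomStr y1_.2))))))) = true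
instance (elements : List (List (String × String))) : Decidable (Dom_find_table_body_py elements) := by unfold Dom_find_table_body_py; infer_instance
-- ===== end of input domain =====

-- B replaces A's two early-return scans by one pass keeping first-id-match and first-type-match accumulators (alternative decomposition, same cost).


-- ===== PORT A =====
-- first loop of A: return the first element whose "id" is "r_table_body"
def pvPassId : List (List (String × String)) → Option (List (String × String))
  | [] => none
  | el :: rest =>
      if (PySem.Dict.mk el).get? "id" = some "r_table_body" then some el else pvPassId rest

-- second loop of A: return the first element whose "type" is "table_body"
def pvPassType : List (List (String × String)) → Option (List (String × String))
  | [] => none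
  | el :: rest =>
      if (PySem.Dict.mk el).get? "type" = some "table_body" then some el else pvPassType rest

def find_table_body_py (elements : List (List (String × String))) : Option (List (String × String)) :=
  match pvPassId elements with
  | some el => some el
  | none => pvPassType elements

-- ===== PORT B =====
-- loop body of B: update (id_match, type_match) for one element
def pvStep (s : Option (List (String × String)) × Option (List (String × String)))
    (el : List (String × String)) :
    Option (List (String × String)) × Option (List (String × String)) :=
  (if s.1 = none ∧ (PySem.Dict.mk el).get? "id" = some "r_table_body" then some el else s.1,
   if s.2 = none ∧ (PySem.Dict.mk el).get? "type" = some "table_body" then some el else s.2)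

def find_table_body_py_alt (elements : List (List (String × String))) : Option (List (String × String)) :=
  let s := elements.foldl pvStep (none, none)
  match s.1 with
  | some e => some e
  | none => s.2

-- ===== PRECONDITION & SPEC =====
def Spec_find_table_body_py (elements : List (List (String × String))) (out : Option (List (String × String))) : Prop := out = find_table_body_py_alt elements
instance (elements : List (List (String × String))) (out : Option (List (String × String))) : Decidable (Spec_find_table_body_py elements out) := by unfold Spec_find_table_body_py; infer_instance

-- ===== CLAIM (what is proved, stated in full; the proofs are below) =====
def Claim_equal_find_table_body_py : Prop := ∀ (elements : List (List (String × String))), Dom_find_table_body_py elements → Spec_find_table_body_py elements (find_table_body_py elements)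

-- ===== LEMMAS AND PROOFS =====

-- once id_match is set it stays set
theorem pvStep_fst_some (l : List (List (String × String)))
    (x : List (String × String)) (t : Option (List (String × String))) :
    (l.foldl pvStep (some x, t)).1 = some x := by
  induction l generalizing t with
  | nil => rfl
  | cons el rest ih =>
      simp only [List.foldl_cons, pvStep]
      simp only [reduceCtorEq, false_and, if_false]
      exact ih _

-- main loop invariant: B's fold starting from (none, t) agrees with A's two-pass result
theorem pvFold_main (l : List (List (String × String))) (t : Option (List (String × String))) :
    (match (l.foldl pvStep (none, t)).1 with
     | some e => some e
     | none => (l.foldl pvStep (none, t)).2) =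
    (match pvPassId l with
     | some e => some e
     | none => match t with
               | some y => some y
               | none => pvPassType l) := by
  induction l generalizing t with
  | nil => cases t <;> rfl
  | cons el rest ih =>
      simp only [List.foldl_cons, pvStep, pvPassId, pvPassType]
      by_cases hid : (PySem.Dict.mk el).get? "id" = some "r_table_body"
      · simp [hid, pvStep_fst_some]
      · by_cases hty : (PySem.Dict.mk el).get? "type" = some "table_body"
        · cases t with
          | some y => simp [hid, hty, ih (some y)]
          | none => simp [hid, hty, ih (some el)]
        · cases t with
          | some y => simp [hid, hty, ih (some y)]
          | none => simp [hid, hty, ih none]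

-- ===== VERDICT (by name: the statement is the Claim_ definition above) =====
theorem find_table_body_py_spec : Claim_equal_find_table_body_py := by
  intro elements _
  unfold Spec_find_table_body_py find_table_body_py find_table_body_py_alt
  have := pvFold_main elements none
  simpa using this.symm
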